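-- pv_equiv track=rewrite | github.com/projeto-exercicios/Exerc-cios-Python-de-correc-o-autom-tica | 03_Implementacao/DataBase/true_or_false_question_consecutive_sequence/question/version_1/program.py | consecutive_sequences
-- ===== SOURCE A (Python) =====
-- def consecutive_sequences(nums):
--     longest_consecs = []
--     for num in nums:
--         consec = []
--         num_to_see = num
--         consec.append(num)
--         while True:
--             num_to_see +=1
--             if num_to_see in nums:
--                 consec.append(num_to_see)
--             else: break
--         if len(consec) > 1:
--             longest_consecs.append(consec)
--
--     return longest_consecs
-- ===== SOURCE B (Python) =====
-- def consecutive_sequences(nums):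
--     runlen = {}
--     for v in sorted(set(nums), reverse=True):
--         runlen[v] = 1 + runlen.get(v + 1, 0)
--     result = []
--     for num in nums:
--         k = runlen[num]
--         if k > 1:
--             result.append(list(range(num, num + k)))
--     return result
-- ===== Notes on version B (the rewrite author's own statement) =====
-- stated objective: faster
-- what changed: Replaces A's per-element upward membership scan over the list (quadratic-or-worse) with a run-length table built in one pass over the sorted distinct values (runlen[v] = 1 + runlen.get(v+1, 0) processed in decreasing order), then a single pass over nums materializing each run with range.
import Mathlib
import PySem

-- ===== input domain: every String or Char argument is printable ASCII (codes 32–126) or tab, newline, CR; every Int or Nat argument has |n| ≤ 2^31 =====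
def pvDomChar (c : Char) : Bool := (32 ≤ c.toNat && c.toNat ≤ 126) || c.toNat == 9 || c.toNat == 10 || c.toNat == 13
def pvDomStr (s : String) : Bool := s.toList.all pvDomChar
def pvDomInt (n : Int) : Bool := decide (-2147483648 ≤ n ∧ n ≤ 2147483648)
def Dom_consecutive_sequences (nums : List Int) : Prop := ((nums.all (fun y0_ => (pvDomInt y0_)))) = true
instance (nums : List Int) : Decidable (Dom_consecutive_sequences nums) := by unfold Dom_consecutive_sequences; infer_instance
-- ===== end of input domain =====

-- B replaces A's per-element upward membership scan with a run-length table built over the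
-- sorted distinct values (one pass, descending) and a single materializing pass — faster.

-- ===== PORT A =====
-- A's 'while True' loop; the fuel only bounds the iterations (at most nums.length membership
-- tests can succeed since the probed values are strictly increasing, so nums.length + 1 fuel
-- is never exhausted — proved by runTail_stable below)
def csGo (nums : List Int) : Int → List Int → Nat → List Int
  | _, acc, 0 => acc
  | v, acc, f + 1 =>
    let v' := v + 1
    if v' ∈ nums then csGo nums v' (acc ++ [v']) f else acc

def consecutive_sequences (nums : List Int) : List (List Int) :=
  nums.foldl (fun longest_consecs num =>
    let consec := csGo nums num [num] (nums.length + 1)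
    if consec.length > 1 then longest_consecs ++ [consec] else longest_consecs) []

-- ===== PORT B =====
-- B's first loop: runlen[v] = 1 + runlen.get(v + 1, 0) over sorted(set(nums), reverse=True)
def runlenDict (nums : List Int) : PySem.Dict Int Int :=
  (PySem.List.sorted (PySem.Set.ofList nums) (fun x => x) true).foldl
    (fun d v => d.insert v (1 + d.getD (v + 1) 0)) PySem.Dict.empty

def consecutive_sequences_alt (nums : List Int) : List (List Int) :=
  let runlen := runlenDict nums
  nums.foldl (fun result num =>
    let k := runlen.getD num 0
    if k > 1 then result ++ [PySem.List.pyRange num (num + k) 1] else result) []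

-- ===== PRECONDITION & SPEC =====
def Spec_consecutive_sequences (nums : List Int) (out : List (List Int)) : Prop := out = consecutive_sequences_alt nums
instance (nums : List Int) (out : List (List Int)) : Decidable (Spec_consecutive_sequences nums out) := by unfold Spec_consecutive_sequences; infer_instance

-- ===== CLAIM (what is proved, stated in full; the proofs are below) =====
def Claim_equal_consecutive_sequences : Prop := ∀ (nums : List Int), Dom_consecutive_sequences nums → Spec_consecutive_sequences nums (consecutive_sequences nums)

-- ===== LEMMAS AND PROOFS =====

-- the tail of the consecutive run starting above v (fuel-indexed)
def runTail (nums : List Int) : Int → Nat → List Int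
  | _, 0 => []
  | v, f + 1 => if v + 1 ∈ nums then (v + 1) :: runTail nums (v + 1) f else []

-- number of elements of nums above v: an upper bound on the remaining loop iterations
def cnt (nums : List Int) (v : Int) : Nat := (nums.filter (fun x => decide (v < x))).length

lemma cnt_le_length (nums : List Int) (v : Int) : cnt nums v ≤ nums.length :=
  List.length_filter_le _ _

lemma cnt_lt (nums : List Int) (v : Int) (h : v + 1 ∈ nums) :
    cnt nums (v + 1) < cnt nums v := by
  induction nums with
  | nil => cases h
  | cons a t ih =>
    have hmono : (t.filter (fun x => decide (v + 1 < x))).length ≤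
        (t.filter (fun x => decide (v < x))).length := by
      apply List.Sublist.length_le
      apply List.monotone_filter_right
      intro x hx
      simp only [decide_eq_true_eq] at hx ⊢
      omega
    simp only [cnt, List.filter_cons] at ih ⊢
    by_cases h2 : v + 1 ∈ t
    · have ht := ih h2
      by_cases ha1 : v + 1 < a
      · have ha2 : v < a := by omega
        simp only [ha1, ha2, decide_true, if_pos]
        simpa using ht
      · by_cases ha2 : v < a
        · simp only [ha1, ha2, decide_true, decide_false, if_pos]
          simp only [Bool.false_eq_true, if_false, List.length_cons]
          omega
        · simp only [ha1, ha2, decide_false]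
          simpa using ht
    · have ha : a = v + 1 := by
        rcases List.mem_cons.mp h with h' | h'
        · exact h'.symm
        · exact absurd h' h2
      subst ha
      have c1 : decide (v + 1 < v + 1) = false := by simp
      have c2 : decide (v < v + 1) = true := by simp
      rw [c1, c2]
      simp only [Bool.false_eq_true, if_false, if_pos, List.length_cons]
      omega

lemma runTail_stable (nums : List Int) :
    ∀ f g v, cnt nums v ≤ f → cnt nums v ≤ g →
      runTail nums v f = runTail nums v g := by
  intro f
  induction f with
  | zero =>
    intro g v hf hg
    cases g with
    | zero => rfl
    | succ g' =>
      by_cases hm : v + 1 ∈ nums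
      · exfalso
        have h1 : cnt nums (v + 1) < cnt nums v := cnt_lt nums v hm
        omega
      · simp [runTail, hm]
  | succ f' ih =>
    intro g v hf hg
    by_cases hm : v + 1 ∈ nums
    · have h1 : cnt nums (v + 1) < cnt nums v := cnt_lt nums v hm
      cases g with
      | zero => omega
      | succ g' =>
        simp only [runTail, hm, if_true]
        congr 1
        exact ih g' (v + 1) (by omega) (by omega)
    · cases g <;> simp [runTail, hm]

-- canonical tail (fuel = nums.length, always sufficient)
def ctail (nums : List Int) (v : Int) : List Int := runTail nums v nums.length

-- the integer run length stored by B's dict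
def iLen (nums : List Int) (v : Int) : Int := 1 + (ctail nums v).length

lemma csGo_eq_runTail (nums : List Int) :
    ∀ f v acc, csGo nums v acc f = acc ++ runTail nums v f := by
  intro f
  induction f with
  | zero => intro v acc; simp [csGo, runTail]
  | succ f' ih =>
    intro v acc
    simp only [csGo, runTail]
    by_cases hm : v + 1 ∈ nums
    · simp [hm, ih]
    · simp [hm]

lemma consec_eq (nums : List Int) (v : Int) :
    csGo nums v [v] (nums.length + 1) = v :: ctail nums v := by
  rw [csGo_eq_runTail]
  have : runTail nums v (nums.length + 1) = runTail nums v nums.length :=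
    runTail_stable nums _ _ v (by have := cnt_le_length nums v; omega) (cnt_le_length nums v)
  simp [ctail, this]

lemma run_eq_pyRange (nums : List Int) :
    ∀ f v, v :: runTail nums v f =
      PySem.List.pyRange v (v + (1 + ((runTail nums v f).length : Int))) 1 := by
  intro f
  induction f with
  | zero =>
    intro v
    simp only [runTail, List.length_nil, Nat.cast_zero, add_zero]
    exact (PySem.List.pyRange_one_singleton v).symm
  | succ f' ih =>
    intro v
    by_cases hm : v + 1 ∈ nums
    · simp only [runTail, hm, if_true, List.length_cons]
      rw [PySem.List.pyRange_one_cons (by push_cast; omega)]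
      congr 1
      rw [ih (v + 1)]
      congr 1
      push_cast
      ring
    · simp only [runTail, hm, if_false, List.length_nil, Nat.cast_zero]
      rw [show v + (1 + (0 : Int)) = v + 1 by ring, PySem.List.pyRange_one_singleton]

lemma ctail_cons (nums : List Int) (v : Int) (hv : v ∈ nums) (hs : v + 1 ∈ nums) :
    ctail nums v = (v + 1) :: ctail nums (v + 1) := by
  have hlen : 1 ≤ nums.length := List.length_pos_of_mem hv
  obtain ⟨F', hF⟩ : ∃ F', nums.length = F' + 1 := ⟨nums.length - 1, by omega⟩
  have h1 : cnt nums (v + 1) < cnt nums v := cnt_lt nums v hs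
  have h2 : cnt nums v ≤ nums.length := cnt_le_length nums v
  have hstab : runTail nums (v + 1) F' = runTail nums (v + 1) nums.length :=
    runTail_stable nums F' nums.length (v + 1) (by omega) (cnt_le_length nums (v + 1))
  calc runTail nums v nums.length
      = runTail nums v (F' + 1) := by rw [← hF]
    _ = (v + 1) :: runTail nums (v + 1) F' := by simp only [runTail, hs, if_true]
    _ = (v + 1) :: runTail nums (v + 1) nums.length := by rw [hstab]

lemma iLen_rec (nums : List Int) (v : Int) (hv : v ∈ nums) (hs : v + 1 ∈ nums) :
    iLen nums v = 1 + iLen nums (v + 1) := by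
  unfold iLen
  rw [ctail_cons nums v hv hs]
  push_cast [List.length_cons]
  ring

lemma iLen_one (nums : List Int) (v : Int) (hv : v ∈ nums) (hs : v + 1 ∉ nums) :
    iLen nums v = 1 := by
  have hlen : 1 ≤ nums.length := List.length_pos_of_mem hv
  obtain ⟨F', hF⟩ : ∃ F', nums.length = F' + 1 := ⟨nums.length - 1, by omega⟩
  have : ctail nums v = [] := by
    unfold ctail
    rw [hF]
    simp [runTail, hs]
  simp [iLen, this]

lemma pairwise_gt_of_sorted_rev (nums : List Int) :
    (PySem.List.sorted (PySem.Set.ofList nums) (fun x => x) true).Pairwise (· > ·) := by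
  have hge := PySem.List.sorted_pairwise_rev (PySem.Set.ofList nums) (fun x => x)
  have hnd : (PySem.List.sorted (PySem.Set.ofList nums) (fun x => x) true).Nodup :=
    ((PySem.List.sorted_perm (PySem.Set.ofList nums) (fun x => x) true).nodup_iff).mpr
      (PySem.Set.nodup_ofList nums)
  exact (hge.and hnd).imp fun h => lt_of_le_of_ne h.1 (Ne.symm h.2)

lemma dict_inv (nums : List Int) :
    ∀ (l : List Int) (d : PySem.Dict Int Int),
      l.Pairwise (· > ·) → (∀ x ∈ l, x ∈ nums) →
      (∀ w : Int, d.getD w 0 = if w ∈ nums ∧ w ∉ l then iLen nums w else 0) →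
      ∀ w : Int,
        (l.foldl (fun d v => d.insert v (1 + d.getD (v + 1) 0)) d).getD w 0 =
          if w ∈ nums then iLen nums w else 0 := by
  intro l
  induction l with
  | nil =>
    intro d _ _ hd w
    simpa using hd w
  | cons v r ih =>
    intro d hp hmem hd
    simp only [List.foldl_cons]
    have hpr : r.Pairwise (· > ·) := hp.of_cons
    have hhead : ∀ x ∈ r, v > x := fun x hx => List.rel_of_pairwise_cons hp hx
    have hvnums : v ∈ nums := hmem v List.mem_cons_self
    apply ih _ hpr (fun x hx => hmem x (List.mem_cons_of_mem v hx))
    intro w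
    rw [PySem.Dict.getD_insert]
    by_cases hwv : w = v
    · subst hwv
      have hnotr : w ∉ r := fun hwr => absurd (hhead w hwr) (lt_irrefl w)
      rw [if_pos rfl, if_pos ⟨hvnums, hnotr⟩]
      by_cases hs : w + 1 ∈ nums
      · have hw1 : w + 1 ∉ (w :: r) := by
          intro hc
          rcases List.mem_cons.mp hc with h' | h'
          · omega
          · have := hhead _ h'; omega
        rw [hd (w + 1), if_pos ⟨hs, hw1⟩, iLen_rec nums w hvnums hs]
      · rw [hd (w + 1), if_neg (fun hcon => hs hcon.1), iLen_one nums w hvnums hs]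
        norm_num
    · rw [if_neg hwv, hd w]
      by_cases hwn : w ∈ nums
      · by_cases hwr : w ∈ r
        · rw [if_neg (fun hcon => hcon.2 (List.mem_cons_of_mem v hwr)),
             if_neg (fun hcon => hcon.2 hwr)]
        · have h1 : w ∉ (v :: r) := by simp [hwv, hwr]
          rw [if_pos ⟨hwn, h1⟩, if_pos ⟨hwn, hwr⟩]
      · rw [if_neg (fun hcon => hwn hcon.1), if_neg (fun hcon => hwn hcon.1)]

lemma runlen_getD (nums : List Int) (w : Int) :
    (runlenDict nums).getD w 0 = if w ∈ nums then iLen nums w else 0 := by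
  unfold runlenDict
  apply dict_inv nums _ _ (pairwise_gt_of_sorted_rev nums)
  · intro x hx
    have : x ∈ PySem.Set.ofList nums := (PySem.List.mem_sorted _ _ _ _).mp hx
    exact (PySem.Set.mem_ofList nums x).mp this
  · intro u
    rw [PySem.Dict.getD_empty]
    by_cases hu : u ∈ nums ∧ u ∉ PySem.List.sorted (PySem.Set.ofList nums) (fun x => x) true
    · exact absurd ((PySem.List.mem_sorted _ _ _ _).mpr ((PySem.Set.mem_ofList nums u).mpr hu.1)) hu.2
    · rw [if_neg hu]

-- ===== VERDICT (by name: the statement is the Claim_ definition above) =====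
theorem consecutive_sequences_spec : Claim_equal_consecutive_sequences := by
  intro nums _
  unfold Spec_consecutive_sequences consecutive_sequences consecutive_sequences_alt
  apply PySem.List.foldl_congr_mem
  intro acc x hx
  show (if (csGo nums x [x] (nums.length + 1)).length > 1
          then acc ++ [csGo nums x [x] (nums.length + 1)] else acc)
      = (if (runlenDict nums).getD x 0 > 1
          then acc ++ [PySem.List.pyRange x (x + (runlenDict nums).getD x 0) 1] else acc)
  rw [consec_eq nums x, runlen_getD nums x, if_pos hx]
  have hrange : PySem.List.pyRange x (x + iLen nums x) 1 = x :: ctail nums x := by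
    rw [show x + iLen nums x = x + (1 + ((runTail nums x nums.length).length : Int)) by
          simp [iLen, ctail]]
    exact (run_eq_pyRange nums nums.length x).symm
  rw [hrange]
  have hcond : ((x :: ctail nums x).length > 1) ↔ (iLen nums x > 1) := by
    simp only [List.length_cons, iLen]
    omega
  by_cases h : iLen nums x > 1
  · rw [if_pos (hcond.mpr h), if_pos h]
  · rw [if_neg (fun hc => h (hcond.mp hc)), if_neg h]
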